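-- pv_equiv track=rewrite | github.com/kjasperi/AdventOfCode | 2023/day7/p2.py | isHighCard
-- ===== SOURCE A (Python) =====
-- def isHighCard(hand):
--     card_dict = {}
--     for card in hand:
--         if card in card_dict:
--             card_dict[card] += 1
--         else:
--             card_dict[card] = 1
--     pairs = []
--     singles = []
--     for t in card_dict:
--         if card_dict[t] == 2:
--             pairs.append(t)
--         if card_dict[t] == 1:
--             singles.append(t)
--     if len(singles) == 5:
--         return True
--     return False
-- ===== SOURCE B (Python) =====
-- def isHighCard(hand):
--     s = sorted(hand)
--     singles = 0
--     i = 0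
--     while i < len(s):
--         j = i + 1
--         while j < len(s) and s[j] == s[i]:
--             j += 1
--         if j == i + 1:
--             singles += 1
--         i = j
--     return singles == 5
-- ===== Notes on version B (the rewrite author's own statement) =====
-- stated objective: alternative
-- what changed: Replaces the hash-count dict and pairs/singles scan with sort-then-scan: sort the hand and count maximal runs of length one in a single adjacent-comparison sweep, no per-card counts maintained.
import Mathlib
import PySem

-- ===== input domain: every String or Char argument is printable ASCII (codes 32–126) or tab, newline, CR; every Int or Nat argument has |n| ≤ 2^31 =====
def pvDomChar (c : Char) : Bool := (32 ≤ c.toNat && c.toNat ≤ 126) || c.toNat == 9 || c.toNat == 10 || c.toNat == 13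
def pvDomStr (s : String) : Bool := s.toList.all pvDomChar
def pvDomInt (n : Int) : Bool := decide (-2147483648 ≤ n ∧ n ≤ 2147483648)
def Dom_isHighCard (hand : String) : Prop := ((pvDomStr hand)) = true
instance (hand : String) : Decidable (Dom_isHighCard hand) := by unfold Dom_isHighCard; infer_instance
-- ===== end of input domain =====

-- B replaces A's counting dict and pairs/singles scan by sort-then-scan: sort the hand and
-- count maximal runs of length one in one adjacent-comparison sweep (alternative algorithm).

-- ===== PORT A =====
def isHighCard (hand : String) : Bool :=
  let card_dict := hand.toList.foldl
    (fun (d : PySem.Dict Char Int) card =>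
      if d.contains card then d.insert card (d.getD card 0 + 1)
      else d.insert card 1)
    PySem.Dict.empty
  let ps := card_dict.keys.foldl
    (fun (ps : List Char × List Char) t =>
      let ps := if card_dict.getD t 0 == 2 then (ps.1 ++ [t], ps.2) else ps
      if card_dict.getD t 0 == 1 then (ps.1, ps.2 ++ [t]) else ps)
    ([], [])
  if ps.2.length == 5 then true else false

-- ===== PORT B =====
-- the inner while loop: the run of elements equal to the first one is xs.takeWhile,
-- the scan resumes at i = j, i.e. on xs.dropWhile; 'j == i + 1' is 'the run beyond s[i] is empty'
def pvRunSingles : List Char → Nat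
  | [] => 0
  | x :: xs =>
    (if xs.takeWhile (fun c => c == x) = [] then 1 else 0)
      + pvRunSingles (xs.dropWhile (fun c => c == x))
termination_by l => l.length
decreasing_by
  simpa using Nat.lt_succ_of_le (List.length_dropWhile_le _ _)

def isHighCard_alt (hand : String) : Bool :=
  pvRunSingles (PySem.List.sorted hand.toList (fun c => c) false) == 5

-- ===== PRECONDITION & SPEC =====
def Spec_isHighCard (hand : String) (out : Bool) : Prop := out = isHighCard_alt hand
instance (hand : String) (out : Bool) : Decidable (Spec_isHighCard hand out) := by unfold Spec_isHighCard; infer_instance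

-- ===== CLAIM (what is proved, stated in full; the proofs are below) =====
def Claim_equal_isHighCard : Prop := ∀ (hand : String), Dom_isHighCard hand → Spec_isHighCard hand (isHighCard hand)

-- ===== LEMMAS AND PROOFS =====

-- A's dict-building loop builds exactly Counter(hand): the 'card in dict' branch split is redundant.
lemma dict_loop_eq_counter (l : List Char) :
    l.foldl
      (fun (d : PySem.Dict Char Int) card =>
        if d.contains card then d.insert card (d.getD card 0 + 1)
        else d.insert card 1)
      PySem.Dict.empty = PySem.Dict.counter l := by
  rw [← PySem.Dict.foldl_insert_getD_add_one_eq_counter]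
  apply PySem.List.foldl_congr_mem
  intro d x _
  by_cases h : d.contains x = true
  · simp [h]
  · simp only [Bool.not_eq_true] at h
    rw [if_neg (by simp [h]), PySem.Dict.getD_of_not_contains _ _ h]
    norm_num

-- the second component of A's pairs/singles loop is a filter of the keys
lemma singles_loop (cd : PySem.Dict Char Int) (l : List Char) (p s : List Char) :
    (l.foldl
      (fun (ps : List Char × List Char) t =>
        let ps := if cd.getD t 0 == 2 then (ps.1 ++ [t], ps.2) else ps
        if cd.getD t 0 == 1 then (ps.1, ps.2 ++ [t]) else ps)
      (p, s)).2 = s ++ l.filter (fun t => cd.getD t 0 == 1) := by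
  induction l generalizing p s with
  | nil => simp
  | cons x xs ih =>
    simp only [List.foldl_cons, List.filter_cons]
    by_cases h2 : (cd.getD x 0 == 2) = true <;> by_cases h1 : (cd.getD x 0 == 1) = true <;>
      simp only [h2, h1, Bool.not_eq_true] at * <;>
      simp only [if_true, ih] <;> simp

-- on a weakly increasing list, the run-of-length-one sweep counts the distinct elements of count 1
lemma runSingles_sorted (l : List Char) (h : l.Pairwise (· ≤ ·)) :
    pvRunSingles l = (PySem.Set.ofList l).countP (fun c => l.count c == 1) := by
  induction hn : l.length using Nat.strong_induction_on generalizing l with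
  | _ n ih =>
  match l, h with
  | [], _ => simp [pvRunSingles]
  | x :: xs, h =>
    have hsplit : xs = xs.takeWhile (fun c => c == x) ++ xs.dropWhile (fun c => c == x) :=
      (List.takeWhile_append_dropWhile).symm
    set run := xs.takeWhile (fun c => c == x) with hrun
    set rest := xs.dropWhile (fun c => c == x) with hrest
    have hrun_mem : ∀ c ∈ run, c = x := by
      intro c hc
      have := List.mem_takeWhile_imp hc
      simpa using this
    have hge : ∀ c ∈ xs, x ≤ c := by
      intro c hc; exact (List.pairwise_cons.mp h).1 c hc
    have hrest_sorted : rest.Pairwise (· ≤ ·) := by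
      rw [hrest]
      exact (List.pairwise_cons.mp h).2.sublist (List.dropWhile_sublist _)
    have hx_not_rest : x ∉ rest := by
      intro hmem
      obtain ⟨r0, rt, hr⟩ : ∃ r0 rt, rest = r0 :: rt := by
        cases hcase : rest with
        | nil => rw [hcase] at hmem; simp at hmem
        | cons a b => exact ⟨a, b, rfl⟩
      have hr0 : (r0 == x) = false := by
        have h0 := List.head?_dropWhile_not (fun c => c == x) xs
        rw [← hrest, hr] at h0
        simpa using h0
      have hxr0 : x ≤ r0 := hge r0 (by rw [hsplit, hr]; simp)
      rw [hr] at hrest_sorted hmem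
      have hr0x : r0 ≤ x := by
        rcases List.mem_cons.mp hmem with h1 | h1
        · exact le_of_eq h1.symm
        · exact (List.pairwise_cons.mp hrest_sorted).1 x h1
      have hxe : r0 = x := le_antisymm hr0x hxr0
      simp [hxe] at hr0
    have hcount_rest_x : rest.count x = 0 := List.count_eq_zero.mpr hx_not_rest
    have hcount_run : run.count x = run.length := by
      apply List.count_eq_length.mpr
      intro c hc; exact ((hrun_mem c hc) ▸ rfl)
    have hcount_x : (x :: xs).count x = 1 + run.length := by
      rw [List.count_cons_self]
      conv_lhs => rw [hsplit]
      rw [List.count_append, hcount_run, hcount_rest_x]; omega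
    have hcount_ne : ∀ c, c ≠ x → (x :: xs).count c = rest.count c := by
      intro c hc
      rw [List.count_cons_of_ne (Ne.symm hc)]
      conv_lhs => rw [hsplit]
      rw [List.count_append, List.count_eq_zero.mpr, Nat.zero_add]
      intro hmem; exact hc (hrun_mem c hmem)
    -- the distinct elements of x :: xs are x plus the distinct elements of rest
    have hperm : (PySem.Set.ofList (x :: xs)).Perm (x :: PySem.Set.ofList rest) := by
      rw [List.perm_ext_iff_of_nodup (PySem.Set.nodup_ofList _)
        (List.nodup_cons.mpr ⟨fun hm => hx_not_rest ((PySem.Set.mem_ofList _ _).mp hm),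
          PySem.Set.nodup_ofList _⟩)]
      intro a
      simp only [PySem.Set.mem_ofList, List.mem_cons]
      constructor
      · rintro (rfl | ha)
        · exact Or.inl rfl
        · rw [hsplit] at ha
          rcases List.mem_append.mp ha with h1 | h1
          · exact Or.inl (hrun_mem a h1)
          · exact Or.inr h1
      · rintro (rfl | ha)
        · exact Or.inl rfl
        · exact Or.inr (by rw [hsplit]; exact List.mem_append_right _ ha)
    have hIH : pvRunSingles rest = (PySem.Set.ofList rest).countP (fun c => rest.count c == 1) := by
      refine ih rest.length ?_ rest hrest_sorted rfl
      subst hn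
      have hle : rest.length ≤ xs.length := by
        rw [hrest]; exact List.length_dropWhile_le _ _
      simp only [List.length_cons]; omega
    rw [pvRunSingles, ← hrun, ← hrest, hIH, hperm.countP_eq]
    rw [List.countP_cons]
    have hcong : (PySem.Set.ofList rest).countP (fun c => (x :: xs).count c == 1)
        = (PySem.Set.ofList rest).countP (fun c => rest.count c == 1) := by
      apply List.countP_congr
      intro c hc
      have hcx : c ≠ x := fun hcx => hx_not_rest (hcx ▸ ((PySem.Set.mem_ofList _ _).mp hc))
      rw [hcount_ne c hcx]
    rw [hcong, Nat.add_comm]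
    congr 1
    rw [hcount_x]
    cases run with
    | nil => simp
    | cons a as => simp

-- ===== VERDICT (by name: the statement is the Claim_ definition above) =====
theorem isHighCard_spec : Claim_equal_isHighCard := by
  intro hand _
  unfold Spec_isHighCard isHighCard isHighCard_alt
  simp only [dict_loop_eq_counter]
  rw [singles_loop]
  simp only [List.nil_append, PySem.Dict.keys_counter, PySem.Dict.getD_counter,
    ← List.countP_eq_length_filter]
  set l := hand.toList
  set s := PySem.List.sorted l (fun c => c) false with hs
  have hsp : s.Perm l := PySem.List.sorted_perm ..
  have hsorted : s.Pairwise (· ≤ ·) := by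
    have := PySem.List.sorted_pairwise (xs := l) (key := fun c : Char => c)
    simpa using this
  have hB := runSingles_sorted s hsorted
  have hsetperm : (PySem.Set.ofList s).Perm (PySem.Set.ofList l) := by
    rw [List.perm_ext_iff_of_nodup (PySem.Set.nodup_ofList _) (PySem.Set.nodup_ofList _)]
    intro a; simp only [PySem.Set.mem_ofList]; exact hsp.mem_iff
  have hBl : pvRunSingles s = (PySem.Set.ofList l).countP (fun c => l.count c == 1) := by
    rw [hB, hsetperm.countP_eq]
    apply List.countP_congr
    intro c _; rw [hsp.count_eq]
  have hA : List.countP (fun t => ((l.count t : Int) == 1)) (PySem.Set.ofList l)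
      = List.countP (fun c => (l.count c == 1)) (PySem.Set.ofList l) :=
    List.countP_congr (by intro x _; simp)
  rw [hA, ← hBl]
  split <;> simp_all
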